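-- pv_equiv track=rewrite | github.com/songiapp/songidb | scrapy_formatter.py | join_chord_line
-- ===== SOURCE A (Python) =====
-- def join_chord_line(chord_line, text_line):
--     chord_pos = 0
--     text_pos = 0
--     res = ""
--     while text_pos < len(text_line):
--         if chord_pos < len(chord_line) and chord_line[chord_pos] == "[":
--             res += "["
--             chord_pos += 1
--             chord_len = 0
--             while chord_pos < len(chord_line) and chord_line[chord_pos] != "]":
--                 res += chord_line[chord_pos]
--                 chord_pos += 1
--                 chord_len += 1
--             res += "]"
--             if chord_pos < len(chord_line) and chord_line[chord_pos] == "]":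
--                 chord_pos += 1
--
--             while chord_len > 0 and text_pos < len(text_line):
--                 res += text_line[text_pos]
--                 text_pos += 1
--                 chord_len -= 1
--
--             continue
--         res += text_line[text_pos]
--         chord_pos += 1
--         text_pos += 1
--
--     if chord_pos < len(chord_line):
--         res += chord_line[chord_pos:].replace(" ", "")
--     return res
-- ===== SOURCE B (Python) =====
-- def join_chord_line(chord_line, text_line):
--     # Pass 1: tokenize chord_line into an ordered token list.
--     # A token is (start, inner, end): inner is None for a plain one-char token,
--     # or the chord body (chars between '[' and the next ']' / end of line).
--     tokens = []
--     i = 0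
--     n = len(chord_line)
--     while i < n:
--         if chord_line[i] == '[':
--             j = i + 1
--             while j < n and chord_line[j] != ']':
--                 j += 1
--             end = j + 1 if j < n else j
--             tokens.append((i, chord_line[i + 1:j], end))
--             i = end
--         else:
--             tokens.append((i, None, i + 1))
--             i += 1
--     # Pass 2: walk the tokens with a text cursor.
--     out = []
--     t = 0
--     m = len(text_line)
--     for (start, inner, _end) in tokens:
--         if t >= m:
--             return ''.join(out) + chord_line[start:].replace(' ', '')
--         if inner is None:
--             out.append(text_line[t])
--             t += 1
--         else:
--             out.append('[' + inner + ']')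
--             k = min(len(inner), m - t)
--             out.append(text_line[t:t + k])
--             t += k
--     out.append(text_line[t:])
--     return ''.join(out)
-- ===== Notes on version B (the rewrite author's own statement) =====
-- stated objective: faster
-- what changed: A interleaves one cursor over chord_line and one over text_line in a single while-loop with nested inner loops, growing the result by repeated string concatenation; B first tokenizes chord_line into an ordered token list (chord tokens and single-char tokens), then consumes that list against a text cursor in a second pass, emitting slices into a chunk list joined once at the end.
import Mathlib
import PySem

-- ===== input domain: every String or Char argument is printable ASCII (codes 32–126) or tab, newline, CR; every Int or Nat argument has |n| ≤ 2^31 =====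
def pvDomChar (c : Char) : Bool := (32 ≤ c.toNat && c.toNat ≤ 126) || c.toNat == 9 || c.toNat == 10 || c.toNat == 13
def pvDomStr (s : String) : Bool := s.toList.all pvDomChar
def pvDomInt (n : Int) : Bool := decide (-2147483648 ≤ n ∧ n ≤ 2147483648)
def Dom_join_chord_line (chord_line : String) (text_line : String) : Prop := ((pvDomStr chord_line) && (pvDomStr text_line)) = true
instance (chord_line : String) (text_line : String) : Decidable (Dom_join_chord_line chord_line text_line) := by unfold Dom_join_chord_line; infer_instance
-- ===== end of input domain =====

-- B re-decomposes A's interleaved two-cursor loop into two passes (tokenize chord_line, then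
-- consume the tokens against a text cursor, joining slice chunks once at the end instead of
-- repeated string concatenation); same result — objective: faster (measured).
-- All while-loops are ported as structural recursion on a fuel argument that the callers supply
-- large enough to never run out (fuel only makes the same computation total).

-- ===== PORT A =====
-- inner while: collect chars until ']' or end of chord_line; returns (res, chord_pos, chord_len)
def pvScanA (cl : List Char) (fuel : Nat) (cp : Nat) (res : List Char) (len : Nat) :
    List Char × Nat × Nat :=
  match fuel with
  | 0 => (res, cp, len)
  | f + 1 =>
    if h : cp < cl.length then
      let c := cl.get ⟨cp, h⟩
      if c ≠ ']' then pvScanA cl f (cp + 1) (res ++ [c]) (len + 1)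
      else (res, cp, len)
    else (res, cp, len)

-- copy while: 'while chord_len > 0 and text_pos < len(text_line)'
def pvCopyA (tl : List Char) (tp : Nat) (clen : Nat) (res : List Char) : List Char × Nat :=
  match clen with
  | 0 => (res, tp)
  | k + 1 =>
    if h : tp < tl.length then pvCopyA tl (tp + 1) k (res ++ [tl.get ⟨tp, h⟩])
    else (res, tp)

-- outer while over (chord_pos, text_pos, res)
def pvLoopA (cl tl : List Char) (fuel : Nat) (cp tp : Nat) (res : List Char) : List Char :=
  match fuel with
  | 0 => res
  | f + 1 =>
    if ht : tp < tl.length then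
      if cl[cp]? = some '[' then
        let p := pvScanA cl cl.length (cp + 1) (res ++ ['[']) 0
        let res3 := p.1 ++ [']']
        let cp3 := if cl[p.2.1]? = some ']' then p.2.1 + 1 else p.2.1
        let q := pvCopyA tl tp p.2.2 res3
        pvLoopA cl tl f cp3 q.2 q.1
      else
        pvLoopA cl tl f (cp + 1) (tp + 1) (res ++ [tl.get ⟨tp, ht⟩])
    else
      -- chord_line[chord_pos:].replace(" ", "") — exact via PySem.Chars.replace
      if cp < cl.length then res ++ PySem.Chars.replace (cl.drop cp) [' '] [] else res

def join_chord_line (chord_line : String) (text_line : String) : String :=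
  String.ofList (pvLoopA chord_line.toList text_line.toList
    (chord_line.toList.length + text_line.toList.length + 1) 0 0 [])

-- ===== PORT B =====
-- pass-1 helper: index of the next ']' at or after j (or cl.length)
def pvFindClose (cl : List Char) (fuel : Nat) (j : Nat) : Nat :=
  match fuel with
  | 0 => j
  | f + 1 =>
    if h : j < cl.length then
      if cl.get ⟨j, h⟩ ≠ ']' then pvFindClose cl f (j + 1) else j
    else j

-- pass 1: token list; a token is (start, inner?, end)
def pvTokB (cl : List Char) (fuel : Nat) (i : Nat) : List (Nat × Option (List Char) × Nat) :=
  match fuel with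
  | 0 => []
  | f + 1 =>
    if h : i < cl.length then
      if cl.get ⟨i, h⟩ = '[' then
        let j := pvFindClose cl cl.length (i + 1)
        let e := if j < cl.length then j + 1 else j
        (i, some ((cl.drop (i + 1)).take (j - (i + 1))), e) :: pvTokB cl f e
      else
        (i, none, i + 1) :: pvTokB cl f (i + 1)
    else []

-- pass 2: walk the tokens with a text cursor
def pvConsB (cl tl : List Char) (toks : List (Nat × Option (List Char) × Nat)) (t : Nat)
    (out : List Char) : List Char :=
  match toks with
  | [] => out ++ tl.drop t
  | (start, inner, _e) :: rest =>
    if ht : t < tl.length then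
      match inner with
      | none => pvConsB cl tl rest (t + 1) (out ++ [tl.get ⟨t, ht⟩])
      | some inn =>
        let k := min inn.length (tl.length - t)
        pvConsB cl tl rest (t + k) (out ++ ['['] ++ inn ++ [']'] ++ (tl.drop t).take k)
    else out ++ PySem.Chars.replace (cl.drop start) [' '] []

def join_chord_line_alt (chord_line : String) (text_line : String) : String :=
  String.ofList (pvConsB chord_line.toList text_line.toList
    (pvTokB chord_line.toList chord_line.toList.length 0) 0 [])

-- ===== PRECONDITION & SPEC =====
def Spec_join_chord_line (chord_line : String) (text_line : String) (out : String) : Prop := out = join_chord_line_alt chord_line text_line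
instance (chord_line : String) (text_line : String) (out : String) : Decidable (Spec_join_chord_line chord_line text_line out) := by unfold Spec_join_chord_line; infer_instance

-- ===== CLAIM (what is proved, stated in full; the proofs are below) =====
def Claim_equal_join_chord_line : Prop := ∀ (chord_line : String) (text_line : String), Dom_join_chord_line chord_line text_line → Spec_join_chord_line chord_line text_line (join_chord_line chord_line text_line)

-- ===== LEMMAS AND PROOFS =====

theorem pvFindClose_ge (cl : List Char) (fuel : Nat) (j : Nat) : j ≤ pvFindClose cl fuel j := by
  fun_induction pvFindClose with
  | case1 j => exact Nat.le_refl j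
  | case2 j f h hne ih => exact Nat.le_trans (Nat.le_succ j) ih
  | case3 j f h hne => exact Nat.le_refl j
  | case4 j f h => exact Nat.le_refl j

theorem pvFindClose_le (cl : List Char) (fuel : Nat) (j : Nat) :
    j ≤ cl.length → pvFindClose cl fuel j ≤ cl.length := by
  fun_induction pvFindClose with
  | case1 j => exact fun h => h
  | case2 j f h hne ih => exact fun _ => ih (by omega)
  | case3 j f h hne => exact fun h => h
  | case4 j f h => exact fun h => h

theorem pvFindClose_lt_imp (cl : List Char) (fuel : Nat) (j : Nat) :
    cl.length ≤ j + fuel → pvFindClose cl fuel j < cl.length →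
    cl[pvFindClose cl fuel j]? = some ']' := by
  fun_induction pvFindClose with
  | case1 j => intro hs hlt; omega
  | case2 j f h hne ih => intro hs hlt; exact ih (by omega) hlt
  | case3 j f h hne =>
    intro hs hlt
    simp at hne
    simp [List.getElem?_eq_getElem h, hne]
  | case4 j f h => intro hs hlt; omega

theorem pvScanA_eq (cl : List Char) (fuel : Nat) (cp : Nat) (res : List Char) (len : Nat) :
    cl.length ≤ cp + fuel →
    pvScanA cl fuel cp res len =
      (res ++ (cl.drop cp).take (pvFindClose cl fuel cp - cp), pvFindClose cl fuel cp,
       len + (pvFindClose cl fuel cp - cp)) := by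
  fun_induction pvScanA with
  | case1 cp res len => intro hs; rw [pvFindClose]; simp
  | case2 cp res len f h c hc ih =>
    intro hs
    have hge := pvFindClose_ge cl f (cp + 1)
    have hc' : ¬ cl[cp] = ']' := by simpa using hc
    have hf : pvFindClose cl (f + 1) cp = pvFindClose cl f (cp + 1) := by
      rw [pvFindClose]; simp [h, hc']
    rw [ih (by omega), hf]
    have hdrop : cl.drop cp = cl.get ⟨cp, h⟩ :: cl.drop (cp + 1) :=
      List.drop_eq_getElem_cons h
    have harith : pvFindClose cl f (cp + 1) - cp = (pvFindClose cl f (cp + 1) - (cp + 1)) + 1 := by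
      omega
    rw [hdrop, harith, List.take_succ_cons]
    rw [Prod.mk.injEq, Prod.mk.injEq]
    exact ⟨by simp [c], rfl, by omega⟩
  | case3 cp res len f h c hc =>
    intro hs
    have hc' : cl[cp] = ']' := by simpa using hc
    have hf : pvFindClose cl (f + 1) cp = cp := by
      rw [pvFindClose]; simp [h, hc']
    simp [hf]
  | case4 cp res len f h =>
    intro hs
    have hf : pvFindClose cl (f + 1) cp = cp := by
      rw [pvFindClose]; simp [h]
    simp [hf]

theorem pvCopyA_eq (tl : List Char) (tp : Nat) (clen : Nat) (res : List Char) :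
    pvCopyA tl tp clen res =
      (res ++ (tl.drop tp).take (min clen (tl.length - tp)),
       tp + min clen (tl.length - tp)) := by
  fun_induction pvCopyA with
  | case1 tp res => simp
  | case2 tp res k h ih =>
    rw [ih]
    have hdrop : tl.drop tp = tl.get ⟨tp, h⟩ :: tl.drop (tp + 1) :=
      List.drop_eq_getElem_cons h
    have harith : min (k + 1) (tl.length - tp) = (min k (tl.length - (tp + 1))) + 1 := by
      omega
    rw [hdrop, harith, List.take_succ_cons]
    rw [Prod.mk.injEq]
    refine ⟨by simp, by omega⟩
  | case3 tp res k h =>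
    have : min (k + 1) (tl.length - tp) = 0 := by omega
    simp [this]

theorem pvTokB_nil (cl : List Char) (fuel : Nat) (i : Nat) (h : cl.length ≤ i) :
    pvTokB cl fuel i = [] := by
  cases fuel with
  | zero => rfl
  | succ f => rw [pvTokB]; simp; omega

theorem pvLoopA_eq_consB (cl tl : List Char) (fuel : Nat) (cp tp : Nat) (res : List Char) :
    tl.length - tp + (cl.length - cp) < fuel →
    ∀ ftok, cl.length ≤ cp + ftok →
    pvLoopA cl tl fuel cp tp res = pvConsB cl tl (pvTokB cl ftok cp) tp res := by
  fun_induction pvLoopA with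
  | case1 cp tp res =>
    intro hf
    omega
  | case2 cp tp res f ht hc p res3 cp3 q ih =>
    intro hf ftok hftok
    have hcp : cp < cl.length := (List.getElem?_eq_some_iff.mp hc).1
    have hget : cl[cp] = '[' := by
      have := (List.getElem?_eq_some_iff.mp hc).2; simpa using this
    have hjle : pvFindClose cl cl.length (cp + 1) ≤ cl.length :=
      pvFindClose_le cl cl.length (cp + 1) (by omega)
    have hjge : cp + 1 ≤ pvFindClose cl cl.length (cp + 1) := pvFindClose_ge cl cl.length (cp + 1)
    have hp : p = (res ++ ['['] ++ (cl.drop (cp + 1)).take (pvFindClose cl cl.length (cp + 1) - (cp + 1)),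
        pvFindClose cl cl.length (cp + 1), pvFindClose cl cl.length (cp + 1) - (cp + 1)) := by
      simp only [p, pvScanA_eq cl cl.length (cp + 1) (res ++ ['[']) 0 (by omega)]
      simp
    have hcp3 : cp3 = (if pvFindClose cl cl.length (cp + 1) < cl.length
        then pvFindClose cl cl.length (cp + 1) + 1 else pvFindClose cl cl.length (cp + 1)) := by
      simp only [cp3, hp]
      by_cases hlt : pvFindClose cl cl.length (cp + 1) < cl.length
      · have he := pvFindClose_lt_imp cl cl.length (cp + 1) (by omega) hlt
        rw [List.getElem?_eq_getElem hlt] at he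
        simp [Option.some.inj he, hlt]
      · simp [hlt]
    have hlen : ((cl.drop (cp + 1)).take (pvFindClose cl cl.length (cp + 1) - (cp + 1))).length
        = pvFindClose cl cl.length (cp + 1) - (cp + 1) := by
      simp; omega
    have hq : q = (res ++ ['['] ++ (cl.drop (cp + 1)).take (pvFindClose cl cl.length (cp + 1) - (cp + 1))
          ++ [']'] ++ (tl.drop tp).take (min (pvFindClose cl cl.length (cp + 1) - (cp + 1)) (tl.length - tp)),
        tp + min (pvFindClose cl cl.length (cp + 1) - (cp + 1)) (tl.length - tp)) := by
      simp only [q, res3, hp, pvCopyA_eq]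
    obtain ⟨g, rfl⟩ : ∃ g, ftok = g + 1 := ⟨ftok - 1, by omega⟩
    have htok : pvTokB cl (g + 1) cp = (cp, some ((cl.drop (cp + 1)).take (pvFindClose cl cl.length (cp + 1) - (cp + 1))),
        if pvFindClose cl cl.length (cp + 1) < cl.length then pvFindClose cl cl.length (cp + 1) + 1
        else pvFindClose cl cl.length (cp + 1)) :: pvTokB cl g (if pvFindClose cl cl.length (cp + 1) < cl.length
          then pvFindClose cl cl.length (cp + 1) + 1 else pvFindClose cl cl.length (cp + 1)) := by
      rw [pvTokB]; simp [hcp, hget]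
    have hcp3ge : cp + 1 ≤ cp3 := by
      rw [hcp3]; split <;> omega
    have htp : tp ≤ q.2 := by rw [hq]; exact Nat.le_add_right _ _
    rw [ih (by omega) g (by omega), htok]
    simp only [pvConsB, dif_pos ht]
    rw [hq, hcp3, hlen]
  | case3 cp tp res f ht hc ih =>
    intro hf ftok hftok
    by_cases hcp : cp < cl.length
    · have hget : cl[cp] ≠ '[' := by
        intro hg
        exact hc (by simp [List.getElem?_eq_getElem hcp, hg])
      obtain ⟨g, rfl⟩ : ∃ g, ftok = g + 1 := ⟨ftok - 1, by omega⟩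
      have htok : pvTokB cl (g + 1) cp = (cp, none, cp + 1) :: pvTokB cl g (cp + 1) := by
        rw [pvTokB]; simp [hcp, hget]
      rw [ih (by omega) g (by omega), htok]
      simp only [pvConsB, dif_pos ht]
    · rw [ih (by omega) 0 (by omega), pvTokB_nil cl ftok cp (by omega), pvTokB_nil cl 0 (cp + 1) (by omega)]
      simp only [pvConsB]
      rw [List.drop_eq_getElem_cons ht]
      simp
  | case4 cp tp res f ht hcp =>
    intro hf ftok hftok
    obtain ⟨g, rfl⟩ : ∃ g, ftok = g + 1 := ⟨ftok - 1, by omega⟩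
    by_cases hget : cl[cp] = '['
    · have htok : pvTokB cl (g + 1) cp = (cp, some ((cl.drop (cp + 1)).take (pvFindClose cl cl.length (cp + 1) - (cp + 1))),
          if pvFindClose cl cl.length (cp + 1) < cl.length then pvFindClose cl cl.length (cp + 1) + 1
          else pvFindClose cl cl.length (cp + 1)) :: pvTokB cl g (if pvFindClose cl cl.length (cp + 1) < cl.length
            then pvFindClose cl cl.length (cp + 1) + 1 else pvFindClose cl cl.length (cp + 1)) := by
        rw [pvTokB]; simp [hcp, hget]
      rw [htok]
      simp only [pvConsB, dif_neg ht]
    · have htok : pvTokB cl (g + 1) cp = (cp, none, cp + 1) :: pvTokB cl g (cp + 1) := by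
        rw [pvTokB]; simp [hcp, hget]
      rw [htok]
      simp only [pvConsB, dif_neg ht]
  | case5 cp tp res f ht hcp =>
    intro hf ftok hftok
    rw [pvTokB_nil cl ftok cp (by omega)]
    simp only [pvConsB]
    rw [List.drop_eq_nil_of_le (by omega : tl.length ≤ tp)]
    simp

-- ===== VERDICT (by name: the statement is the Claim_ definition above) =====
theorem join_chord_line_spec : Claim_equal_join_chord_line := by
  intro c t _
  unfold Spec_join_chord_line join_chord_line join_chord_line_alt
  rw [pvLoopA_eq_consB c.toList t.toList (c.toList.length + t.toList.length + 1) 0 0 []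
    (by omega) c.toList.length (by omega)]
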